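-- pv_equiv track=rewrite | github.com/owenhowell20/Induced-and-Restriction-Representations-for-ML | represenations_opps.py | compute_restriction_SO3
-- ===== SOURCE A (Python) =====
-- def compute_restriction_SO3( rep_dict ):
--     rep_out = {}
--     for k in rep_dict.keys():
--
--         ### if non-zero, contains one copy of each SO(2) irr
--         if ( rep_dict[k] != 0 ):
--
--             multplicity = int( rep_dict[k] )
--             for k_s in range(0, int(k) + 1 ):
--
--                 try:
--                     rep_out[ k_s ] = rep_out[ k_s ] + multplicity
--                 except:
--                     rep_out[ k_s ] = multplicity
--
--     return rep_out
-- ===== SOURCE B (Python) =====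
-- def compute_restriction_SO3(rep_dict):
--     # one pass: keep the positive-degree non-zero multiplicities, then a single
--     # running suffix-sum over 0..max_k instead of re-walking 0..k per entry
--     bucket = {k: v for k, v in rep_dict.items() if v != 0 and k >= 0}
--     if not bucket:
--         return {}
--     max_k = max(bucket)
--     run = sum(bucket.values())
--     rep_out = {}
--     for j in range(max_k + 1):
--         rep_out[j] = run
--         run -= bucket.get(j, 0)
--     return rep_out
-- ===== Notes on version B (the rewrite author's own statement) =====
-- stated objective: faster
-- what changed: Instead of adding each multiplicity to every key 0..k in a nested loop, B collects the non-zero positive-degree multiplicities into a bucket dict and produces the result with one running suffix-sum pass over 0..max_k.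
import Mathlib
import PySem

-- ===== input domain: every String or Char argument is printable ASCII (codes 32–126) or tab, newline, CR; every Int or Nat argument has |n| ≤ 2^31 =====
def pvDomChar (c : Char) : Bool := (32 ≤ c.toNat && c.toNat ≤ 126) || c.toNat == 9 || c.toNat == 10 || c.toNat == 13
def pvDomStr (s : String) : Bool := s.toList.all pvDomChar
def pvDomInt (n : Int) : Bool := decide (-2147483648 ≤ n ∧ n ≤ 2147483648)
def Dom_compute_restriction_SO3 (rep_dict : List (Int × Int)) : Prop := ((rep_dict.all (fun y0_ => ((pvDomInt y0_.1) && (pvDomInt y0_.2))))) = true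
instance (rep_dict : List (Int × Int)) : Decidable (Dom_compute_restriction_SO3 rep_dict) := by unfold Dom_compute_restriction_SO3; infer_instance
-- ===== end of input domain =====

-- B replaces A's per-key inner walk over range(0, k+1) by a bucket dict plus a
-- single running suffix-sum pass over 0..max_k (objective: faster).

-- ===== PORT A =====
-- inner loop: 'for k_s in range(0, int(k)+1): try: rep_out[k_s] += m  except: rep_out[k_s] = m'
def aStep (rep_out : PySem.Dict Int Int) (k m : Int) : PySem.Dict Int Int :=
  (PySem.List.pyRange 0 (k + 1) 1).foldl
    (fun d k_s =>
      match d.get? k_s with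
      | some x => d.insert k_s (x + m)
      | none   => d.insert k_s m) rep_out

-- A iterates the dict's keys and looks each value up; on the association-list
-- reading of the dict that is a fold over its (key, value) items.
def compute_restriction_SO3 (rep_dict : List (Int × Int)) : List (Int × Int) :=
  ((PySem.Dict.ofList rep_dict).items.foldl
      (fun rep_out kv => if kv.2 ≠ 0 then aStep rep_out kv.1 kv.2 else rep_out)
      PySem.Dict.empty).items

-- ===== PORT B =====
def compute_restriction_SO3_alt (rep_dict : List (Int × Int)) : List (Int × Int) :=
  let bucket : PySem.Dict Int Int :=
    (PySem.Dict.ofList rep_dict).items.foldl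
      (fun b kv => if kv.2 ≠ 0 ∧ 0 ≤ kv.1 then b.insert kv.1 kv.2 else b)
      PySem.Dict.empty
  if bucket.items = [] then []
  else
    match PySem.List.max? bucket.keys (fun x => x) with
    | none => []   -- unreachable: bucket is non-empty here
    | some max_k =>
      ((PySem.List.pyRange 0 (max_k + 1) 1).foldl
          (fun st j => (st.1.insert j st.2, st.2 - bucket.getD j 0))
          ((PySem.Dict.empty : PySem.Dict Int Int), bucket.values.sum)).1.items

-- ===== PRECONDITION & SPEC =====
def Spec_compute_restriction_SO3 (rep_dict : List (Int × Int)) (out : List (Int × Int)) : Prop := out = compute_restriction_SO3_alt rep_dict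
instance (rep_dict : List (Int × Int)) (out : List (Int × Int)) : Decidable (Spec_compute_restriction_SO3 rep_dict out) := by unfold Spec_compute_restriction_SO3; infer_instance

-- ===== CLAIM (what is proved, stated in full; the proofs are below) =====
def Claim_equal_compute_restriction_SO3 : Prop := ∀ (rep_dict : List (Int × Int)), Dom_compute_restriction_SO3 rep_dict → Spec_compute_restriction_SO3 rep_dict (compute_restriction_SO3 rep_dict)

-- ===== LEMMAS AND PROOFS =====
def canonItems (n : Nat) (g : Int → Int) : List (Int × Int) :=
  (List.range n).map (fun j : Nat => ((j : Int), g (j : Int)))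
def canonD (n : Nat) (g : Int → Int) : PySem.Dict Int Int :=
  PySem.Dict.mk (canonItems n g)

theorem keys_canonD (n : Nat) (g : Int → Int) :
    (canonD n g).keys = (List.range n).map Int.ofNat := by
  show (canonItems n g).map Prod.fst = _
  rw [canonItems, List.map_map]
  rfl

theorem nodup_keys_canonD (n : Nat) (g : Int → Int) : (canonD n g).keys.Nodup := by
  rw [keys_canonD]
  exact List.nodup_range.map (fun a b h => Int.ofNat.inj h)

theorem mem_keys_canonD (n : Nat) (g : Int → Int) (x : Int) :
    x ∈ (canonD n g).keys ↔ 0 ≤ x ∧ x < (n : Int) := by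
  rw [keys_canonD]
  constructor
  · intro hmem
    obtain ⟨j, hj, hje⟩ := List.mem_map.mp hmem
    have hjr := List.mem_range.mp hj
    subst hje
    constructor
    · exact Int.natCast_nonneg j
    · exact_mod_cast Nat.cast_lt.mpr hjr
  · intro h
    have hx : Int.ofNat (x.toNat) = x := Int.toNat_of_nonneg h.1
    exact List.mem_map.mpr ⟨x.toNat, List.mem_range.mpr (by omega), hx⟩

theorem get?_canonD (n : Nat) (g : Int → Int) (x : Int) :
    (canonD n g).get? x = if 0 ≤ x ∧ x < (n : Int) then some (g x) else none := by
  split_ifs with h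
  · refine PySem.Dict.get?_of_mem_items _ ?_ (nodup_keys_canonD n g)
    have hx : ((x.toNat : Nat) : Int) = x := Int.toNat_of_nonneg h.1
    show (x, g x) ∈ canonItems n g
    rw [canonItems]
    refine List.mem_map.mpr ⟨x.toNat, List.mem_range.mpr (by omega), by rw [hx]⟩
  · rw [PySem.Dict.get?_eq_none_iff_not_mem_keys]
    rw [mem_keys_canonD]
    exact h

theorem canonD_congr {n : Nat} {g g' : Int → Int}
    (h : ∀ j : Nat, j < n → g (j : Int) = g' (j : Int)) : canonD n g = canonD n g' := by
  apply PySem.Dict.ext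
  show canonItems n g = canonItems n g'
  unfold canonItems
  exact List.map_congr_left (fun j hj => by rw [h j (List.mem_range.mp hj)])

theorem canonD_zero (g : Int → Int) : canonD 0 g = PySem.Dict.empty := rfl

theorem insert_canonD_lt {n : Nat} {x : Int} (g : Int → Int) (w : Int)
    (hx0 : 0 ≤ x) (hxn : x < (n : Int)) :
    (canonD n g).insert x w = canonD n (fun j => if j = x then w else g j) := by
  apply PySem.Dict.ext
  have hc : (canonD n g).contains x = true :=
    (PySem.Dict.contains_iff_mem_keys _ _).mpr ((mem_keys_canonD n g x).mpr ⟨hx0, hxn⟩)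
  rw [PySem.Dict.items_insert_of_contains _ _ hc]
  have h1 : (canonD n g).items = canonItems n g := rfl
  have h2 : (canonD n (fun j => if j = x then w else g j)).items = canonItems n (fun j => if j = x then w else g j) := rfl
  rw [h1, h2]
  unfold canonItems
  rw [List.map_map]
  refine List.map_congr_left (fun j hj => ?_)
  by_cases hje : (j : Int) = x
  · simp [Function.comp, hje]
  · simp [Function.comp, hje]

theorem insert_canonD_eq (n : Nat) (g : Int → Int) (w : Int) :
    (canonD n g).insert (n : Int) w = canonD (n + 1) (fun j => if j = (n : Int) then w else g j) := by
  apply PySem.Dict.ext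
  have hc : (canonD n g).contains (n : Int) = false := by
    rw [← Bool.not_eq_true, PySem.Dict.contains_iff_mem_keys, mem_keys_canonD]
    omega
  rw [PySem.Dict.items_insert_of_not_contains _ _ hc]
  have h1 : (canonD n g).items = canonItems n g := rfl
  have h2 : (canonD (n + 1) (fun j => if j = (n : Int) then w else g j)).items = canonItems (n + 1) (fun j => if j = (n : Int) then w else g j) := rfl
  rw [h1, h2]
  unfold canonItems
  rw [List.range_succ, List.map_append]
  congr 1
  · refine List.map_congr_left (fun j hj => ?_)
    have hjn := List.mem_range.mp hj
    have hne : ((j : Int)) ≠ (n : Int) := by omega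
    simp [hne]
  · simp

def aLoop (v : Int) (r : List Int) (d : PySem.Dict Int Int) : PySem.Dict Int Int :=
  r.foldl
    (fun d k_s =>
      match d.get? k_s with
      | some x => d.insert k_s (x + v)
      | none   => d.insert k_s v) d

theorem aStep_eq_aLoop (d : PySem.Dict Int Int) (k v : Int) :
    aStep d k v = aLoop v (PySem.List.pyRange 0 (k + 1) 1) d := rfl

theorem aLoop_append (v : Int) (r1 r2 : List Int) (d : PySem.Dict Int Int) :
    aLoop v (r1 ++ r2) d = aLoop v r2 (aLoop v r1 d) := List.foldl_append

theorem aStep_canonD_neg {k : Int} (n : Nat) (g : Int → Int) (v : Int) (hk : k < 0) :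
    aStep (canonD n g) k v = canonD n g := by
  rw [aStep_eq_aLoop, PySem.List.pyRange_one_eq_nil (by omega : k + 1 ≤ 0)]
  rfl

theorem aLoop_partial (v : Int) (t : Nat) : ∀ (n : Nat) (g : Int → Int),
    aLoop v (PySem.List.pyRange 0 (t : Int) 1) (canonD n g)
    = canonD (max n t)
        (fun j => (if j < (n : Int) then g j else 0) + (if j < (t : Int) then v else 0)) := by
  induction t with
  | zero =>
    intro n g
    rw [PySem.List.pyRange_one_eq_nil (by omega)]
    show canonD n g = _
    rw [Nat.max_zero]
    refine canonD_congr (fun j hj => ?_)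
    have h1 : ((j : Nat) : Int) < (n : Int) := by exact_mod_cast hj
    have h2 : ¬ (((j : Nat) : Int) < ((0 : Nat) : Int)) := by omega
    rw [if_pos h1, if_neg h2, add_zero]
  | succ t ih =>
    intro n g
    have hc : ((t + 1 : Nat) : Int) = ((t : Nat) : Int) + 1 := by push_cast; ring
    rw [hc, PySem.List.pyRange_one_succ_right (by omega), aLoop_append, ih]
    by_cases h : t < n
    · -- overwrite case: index t already present
      have hmax : max n t = n := by omega
      have hmax' : max n (t + 1) = n := by omega
      have hget : (canonD (max n t) (fun j => (if j < (n : Int) then g j else 0) + (if j < (t : Int) then v else 0))).get? (t : Int)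
          = some (g (t : Int)) := by
        rw [get?_canonD, if_pos ⟨by omega, by push_cast [Nat.cast_max]; omega⟩]
        have ht : ((t : Nat) : Int) < (n : Int) := by exact_mod_cast h
        rw [if_pos ht, if_neg (by omega), add_zero]
      show aLoop v [(t : Int)] _ = _
      unfold aLoop
      simp only [List.foldl_cons, List.foldl_nil, hget]
      rw [insert_canonD_lt _ _ (by omega) (by push_cast [Nat.cast_max]; omega)]
      rw [hmax, hmax']
      refine canonD_congr (fun j hj => ?_)
      have hjn : ((j : Nat) : Int) < (n : Int) := by exact_mod_cast hj
      rcases eq_or_ne ((j : Nat) : Int) ((t : Nat) : Int) with hjt | hjt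
      · rw [← hjt]
        split_ifs <;> first | rfl | omega | (exfalso; omega) | simp
      · split_ifs <;> first | rfl | omega | (exfalso; omega) | simp
    · -- append case: index t is fresh
      have hmax : max n t = t := by omega
      have hmax' : max n (t + 1) = t + 1 := by omega
      have hget : (canonD (max n t) (fun j => (if j < (n : Int) then g j else 0) + (if j < (t : Int) then v else 0))).get? (t : Int)
          = none := by
        rw [get?_canonD, if_neg]
        push_cast [Nat.cast_max]
        omega
      show aLoop v [(t : Int)] _ = _
      unfold aLoop
      simp only [List.foldl_cons, List.foldl_nil, hget]
      rw [hmax]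
      rw [insert_canonD_eq t _ v, hmax']
      refine canonD_congr (fun j hj => ?_)
      have hjn : j < t + 1 := hj
      rcases eq_or_ne ((j : Nat) : Int) ((t : Nat) : Int) with hjt | hjt
      · rw [← hjt]
        split_ifs <;> first | rfl | omega | (exfalso; omega) | simp
      · split_ifs <;> first | rfl | omega | (exfalso; omega) | simp

theorem aStep_canonD {k : Int} (n : Nat) (g : Int → Int) (v : Int) (hk : 0 ≤ k) :
    aStep (canonD n g) k v
      = canonD (max n (k + 1).toNat)
          (fun j => (if j < (n : Int) then g j else 0) + (if j ≤ k then v else 0)) := by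
  rw [aStep_eq_aLoop]
  have hc : k + 1 = (((k + 1).toNat : Nat) : Int) := by omega
  rw [hc, aLoop_partial]
  refine canonD_congr (fun j hj => ?_)
  congr 1
  by_cases hle : ((j : Nat) : Int) ≤ k
  · rw [if_pos (by omega), if_pos hle]
  · rw [if_neg (by omega), if_neg hle]

def Smul (l : List (Int × Int)) (j : Int) : Int :=
  (l.map (fun kv => if j ≤ kv.1 then kv.2 else 0)).sum

def Nmul (l : List (Int × Int)) : Nat :=
  l.foldl (fun n kv => if kv.2 ≠ 0 then max n (kv.1 + 1).toNat else n) 0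

theorem Nmul_append (l : List (Int × Int)) (kv : Int × Int) :
    Nmul (l ++ [kv]) = if kv.2 ≠ 0 then max (Nmul l) (kv.1 + 1).toNat else Nmul l := by
  unfold Nmul
  rw [List.foldl_append]
  rfl

theorem Nmul_bound : ∀ (l : List (Int × Int)) (n₀ : Nat),
    n₀ ≤ l.foldl (fun n kv => if kv.2 ≠ 0 then max n (kv.1 + 1).toNat else n) n₀ ∧
    ∀ kv ∈ l, kv.2 ≠ 0 →
      (kv.1 + 1).toNat ≤ l.foldl (fun n kv => if kv.2 ≠ 0 then max n (kv.1 + 1).toNat else n) n₀ := by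
  intro l
  induction l with
  | nil => exact fun n₀ => ⟨le_refl _, fun kv h => absurd h (List.not_mem_nil)⟩
  | cons hd tl ih =>
    intro n₀
    simp only [List.foldl_cons]
    constructor
    · exact le_trans (by split_ifs <;> omega) (ih _).1
    · intro kv hkv hne
      rcases List.mem_cons.mp hkv with he | ht
      · subst he
        refine le_trans ?_ (ih _).1
        rw [if_pos hne]
        omega
      · exact (ih _).2 kv ht hne

theorem Smul_append (l : List (Int × Int)) (kv : Int × Int) (j : Int) :
    Smul (l ++ [kv]) j = Smul l j + (if j ≤ kv.1 then kv.2 else 0) := by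
  unfold Smul
  rw [List.map_append, List.sum_append]
  simp

theorem Smul_zero_of_ge (l : List (Int × Int)) (j : Int) (hj : (Nmul l : Int) ≤ j) :
    Smul l j = 0 := by
  unfold Smul
  apply List.sum_eq_zero
  intro x hx
  obtain ⟨kv, hkv, hxe⟩ := List.mem_map.mp hx
  subst hxe
  by_cases hne : kv.2 = 0
  · split_ifs <;> simp [hne]
  · have hb := (Nmul_bound l 0).2 kv hkv hne
    have : (kv.1 + 1).toNat ≤ Nmul l := hb
    rw [if_neg (by omega)]

theorem A_fold (l : List (Int × Int)) :
    (l.foldl (fun rep_out kv => if kv.2 ≠ 0 then aStep rep_out kv.1 kv.2 else rep_out)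
        PySem.Dict.empty)
      = canonD (Nmul l) (Smul l) := by
  induction l using List.reverseRecOn with
  | nil =>
    rw [show Nmul [] = 0 from rfl]
    rw [canonD_zero]
    rfl
  | append_singleton l kv ih =>
    rw [List.foldl_append, ih]
    simp only [List.foldl_cons, List.foldl_nil]
    by_cases hz : kv.2 ≠ 0
    · rw [if_pos hz]
      by_cases hk : 0 ≤ kv.1
      · rw [aStep_canonD _ _ _ hk]
        rw [Nmul_append, if_pos hz]
        refine canonD_congr (fun j hj => ?_)
        rw [Smul_append]
        by_cases hjn : ((j : Nat) : Int) < ((Nmul l : Nat) : Int)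
        · rw [if_pos hjn]
        · rw [if_neg hjn, Smul_zero_of_ge l _ (by omega)]
      · rw [aStep_canonD_neg _ _ _ (by omega)]
        rw [Nmul_append, if_pos hz]
        have hmax : max (Nmul l) (kv.1 + 1).toNat = Nmul l := by omega
        rw [hmax]
        refine canonD_congr (fun j hj => ?_)
        rw [Smul_append, if_neg (by omega), add_zero]
    · rw [if_neg hz]
      have hz : kv.2 = 0 := not_not.mp hz
      rw [Nmul_append, if_neg (by simpa using hz)]
      refine canonD_congr (fun j hj => ?_)
      rw [Smul_append, hz]
      split_ifs <;> simp

def pvFilt (l : List (Int × Int)) : List (Int × Int) :=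
  l.filter (fun kv => decide (kv.2 ≠ 0 ∧ 0 ≤ kv.1))

def pointMul (l : List (Int × Int)) (j : Int) : Int :=
  (l.map (fun kv => if kv.1 = j then kv.2 else 0)).sum

theorem bucket_items (l : List (Int × Int)) (hnd : (l.map Prod.fst).Nodup) :
    (l.foldl (fun b kv => if kv.2 ≠ 0 ∧ 0 ≤ kv.1 then b.insert kv.1 kv.2 else b)
        (PySem.Dict.empty : PySem.Dict Int Int)).items = pvFilt l := by
  have h1 : (l.foldl (fun b kv => if kv.2 ≠ 0 ∧ 0 ≤ kv.1 then b.insert kv.1 kv.2 else b)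
        (PySem.Dict.empty : PySem.Dict Int Int))
      = (pvFilt l).foldl (fun (b : PySem.Dict Int Int) kv => b.insert kv.1 kv.2) PySem.Dict.empty :=
    PySem.List.foldl_ite_eq_foldl_filter (fun kv : Int × Int => kv.2 ≠ 0 ∧ 0 ≤ kv.1)
      (fun (b : PySem.Dict Int Int) kv => b.insert kv.1 kv.2) l PySem.Dict.empty
  rw [h1]
  have hsub : List.Sublist ((pvFilt l).map Prod.fst) (l.map Prod.fst) :=
    List.Sublist.map Prod.fst List.filter_sublist
  have hfl : ((pvFilt l).map Prod.fst).Nodup := List.Nodup.sublist hsub hnd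
  have h2 := PySem.Dict.items_foldl_insert_fresh (pvFilt l) Prod.fst Prod.snd
      (PySem.Dict.empty : PySem.Dict Int Int)
      (fun a _ => PySem.Dict.contains_empty a.1) hfl
  simpa using h2

theorem Smul_succ (l : List (Int × Int)) (j : Int) :
    Smul l j = pointMul l j + Smul l (j + 1) := by
  induction l with
  | nil => rfl
  | cons hd tl ih =>
    unfold Smul pointMul at *
    simp only [List.map_cons, List.sum_cons]
    rw [ih]
    have key : (if j ≤ hd.1 then hd.2 else 0)
        = (if hd.1 = j then hd.2 else 0) + (if j + 1 ≤ hd.1 then hd.2 else 0) := by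
      split_ifs <;> omega
    linarith [key]

theorem pointMul_filt (l : List (Int × Int)) (j : Int) (hj : 0 ≤ j) :
    pointMul (pvFilt l) j = pointMul l j := by
  induction l with
  | nil => rfl
  | cons hd tl ih =>
    unfold pvFilt at *
    rw [List.filter_cons]
    by_cases h : hd.2 ≠ 0 ∧ 0 ≤ hd.1
    · rw [if_pos (by simpa using h)]
      unfold pointMul at *
      simp only [List.map_cons, List.sum_cons]
      rw [ih]
    · rw [if_neg (by simpa using h)]
      unfold pointMul at *
      simp only [List.map_cons, List.sum_cons]
      rw [ih]
      have : (if hd.1 = j then hd.2 else 0) = 0 := by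
        split_ifs with he
        · by_cases hz : hd.2 = 0
          · exact hz
          · exfalso; exact h ⟨hz, by omega⟩
        · rfl
      omega

theorem pointMul_of_not_mem (m : List (Int × Int)) (j : Int) (h : j ∉ m.map Prod.fst) :
    pointMul m j = 0 := by
  apply List.sum_eq_zero
  intro x hx
  obtain ⟨kv, hkv, hxe⟩ := List.mem_map.mp hx
  subst hxe
  rw [if_neg]
  intro he
  exact h (List.mem_map.mpr ⟨kv, hkv, he⟩)

theorem pointMul_of_mem (m : List (Int × Int)) (j v : Int)
    (hnd : (m.map Prod.fst).Nodup) (h : (j, v) ∈ m) : pointMul m j = v := by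
  induction m with
  | nil => exact absurd h (List.not_mem_nil)
  | cons hd tl ih =>
    rw [List.map_cons, List.nodup_cons] at hnd
    unfold pointMul
    simp only [List.map_cons, List.sum_cons]
    rcases List.mem_cons.mp h with he | ht
    · cases he
      rw [if_pos rfl]
      have : pointMul tl j = 0 := pointMul_of_not_mem tl j hnd.1
      unfold pointMul at this
      omega
    · have hne : hd.1 ≠ j := fun he =>
        hnd.1 (by rw [he]; exact List.mem_map.mpr ⟨(j, v), ht, rfl⟩)
      rw [if_neg hne]
      have := ih hnd.2 ht
      unfold pointMul at this
      omega

theorem Smul_zero_filt (l : List (Int × Int)) :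
    ((pvFilt l).map Prod.snd).sum = Smul l 0 := by
  induction l with
  | nil => rfl
  | cons hd tl ih =>
    unfold pvFilt at *
    rw [List.filter_cons]
    unfold Smul at *
    by_cases h : hd.2 ≠ 0 ∧ 0 ≤ hd.1
    · rw [if_pos (by simpa using h)]
      simp only [List.map_cons, List.sum_cons]
      rw [ih, if_pos h.2]
    · rw [if_neg (by simpa using h)]
      simp only [List.map_cons, List.sum_cons]
      rw [ih]
      have : (if 0 ≤ hd.1 then hd.2 else 0) = 0 := by
        split_ifs with he
        · by_cases hz : hd.2 = 0
          · exact hz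
          · exact absurd ⟨hz, he⟩ h
        · rfl
      omega

theorem Nmul_filt (l : List (Int × Int)) :
    Nmul l = (pvFilt l).foldl (fun n kv => max n (kv.1 + 1).toNat) 0 := by
  unfold Nmul pvFilt
  suffices h : ∀ n₀ : Nat, l.foldl (fun n kv => if kv.2 ≠ 0 then max n (kv.1 + 1).toNat else n) n₀
      = (l.filter (fun kv => decide (kv.2 ≠ 0 ∧ 0 ≤ kv.1))).foldl (fun n kv => max n (kv.1 + 1).toNat) n₀ by
    exact h 0
  induction l with
  | nil => intro n₀; rfl
  | cons hd tl ih =>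
    intro n₀
    rw [List.filter_cons]
    by_cases h : hd.2 ≠ 0 ∧ 0 ≤ hd.1
    · rw [if_pos (by simpa using h)]
      simp only [List.foldl_cons, if_pos h.1]
      exact ih _
    · rw [if_neg (by simpa using h)]
      simp only [List.foldl_cons]
      by_cases hz : hd.2 ≠ 0
      · rw [if_pos hz]
        have hneg : hd.1 < 0 := by
          by_contra hc
          exact h ⟨hz, by omega⟩
        have : (hd.1 + 1).toNat = 0 := by omega
        rw [this, Nat.max_zero]
        exact ih _
      · rw [if_neg hz]
        exact ih _

theorem NKfold (ks : List Int) : ∀ (a : Int), 0 ≤ a → (∀ x ∈ ks, 0 ≤ x) →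
    ks.foldl (fun n x => max n (x + 1).toNat) (a + 1).toNat = ((ks.foldl max a) + 1).toNat := by
  induction ks with
  | nil => intro a _ _; rfl
  | cons hd tl ih =>
    intro a ha hall
    simp only [List.foldl_cons]
    have hhd : 0 ≤ hd := hall hd (List.mem_cons_self)
    have h1 : max (a + 1).toNat (hd + 1).toNat = ((max a hd) + 1).toNat := by omega
    rw [h1]
    exact ih (max a hd) (by omega) (fun x hx => hall x (List.mem_cons_of_mem _ hx))

theorem B_loop (bucket : PySem.Dict Int Int) (l : List (Int × Int))
    (hb : ∀ j : Int, 0 ≤ j → bucket.getD j 0 = pointMul l j) :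
    ∀ t : Nat,
      (PySem.List.pyRange 0 (t : Int) 1).foldl
          (fun st j => (st.1.insert j st.2, st.2 - bucket.getD j 0))
          ((PySem.Dict.empty : PySem.Dict Int Int), Smul l 0)
        = (canonD t (Smul l), Smul l (t : Int)) := by
  intro t
  induction t with
  | zero =>
    rw [PySem.List.pyRange_one_eq_nil (by omega)]
    rw [canonD_zero]
    rfl
  | succ t ih =>
    have hc : ((t + 1 : Nat) : Int) = ((t : Nat) : Int) + 1 := by push_cast; ring
    rw [hc, PySem.List.pyRange_one_succ_right (by omega), List.foldl_append, ih]
    simp only [List.foldl_cons, List.foldl_nil]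
    rw [Prod.mk.injEq]
    constructor
    · rw [insert_canonD_eq t (Smul l) (Smul l (t : Int))]
      refine canonD_congr (fun j hj => ?_)
      split_ifs with he
      · rw [he]
      · rfl
    · rw [hb _ (by omega)]
      have := Smul_succ l (t : Int)
      omega

theorem pvFilt_nodup (l : List (Int × Int)) (hnd : (l.map Prod.fst).Nodup) :
    ((pvFilt l).map Prod.fst).Nodup :=
  List.Nodup.sublist (List.Sublist.map Prod.fst List.filter_sublist) hnd

theorem pvFilt_keys_nonneg (l : List (Int × Int)) :
    ∀ x ∈ (pvFilt l).map Prod.fst, 0 ≤ x := by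
  intro x hx
  obtain ⟨kv, hkv, hxe⟩ := List.mem_map.mp hx
  have := List.of_mem_filter hkv
  subst hxe
  exact (of_decide_eq_true this).2

theorem ports_agree (rep_dict : List (Int × Int)) :
    compute_restriction_SO3 rep_dict = compute_restriction_SO3_alt rep_dict := by
  unfold compute_restriction_SO3 compute_restriction_SO3_alt
  set l := (PySem.Dict.ofList rep_dict).items with hl
  have hnd : (l.map Prod.fst).Nodup := PySem.Dict.nodup_keys_ofList rep_dict
  rw [A_fold l]
  set bucket := l.foldl
      (fun b kv => if kv.2 ≠ 0 ∧ 0 ≤ kv.1 then b.insert kv.1 kv.2 else b)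
      (PySem.Dict.empty : PySem.Dict Int Int) with hbdef
  have hbitems : bucket.items = pvFilt l := bucket_items l hnd
  have hbkeys : bucket.keys = (pvFilt l).map Prod.fst := by
    show bucket.items.map Prod.fst = _
    rw [hbitems]
  have hbnodup : bucket.keys.Nodup := by rw [hbkeys]; exact pvFilt_nodup l hnd
  have hb : ∀ j : Int, 0 ≤ j → bucket.getD j 0 = pointMul l j := by
    intro j hj
    rw [← pointMul_filt l j hj]
    by_cases hmem : j ∈ (pvFilt l).map Prod.fst
    · obtain ⟨kv, hkv, hxe⟩ := List.mem_map.mp hmem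
      have hkv' : (j, kv.2) ∈ bucket.items := by
        rw [hbitems]
        rw [← hxe]
        exact hkv
      rw [PySem.Dict.getD_of_mem_items bucket hkv' hbnodup 0]
      rw [pointMul_of_mem (pvFilt l) j kv.2 (pvFilt_nodup l hnd) (by rw [← hxe]; exact hkv)]
    · have hcon : bucket.contains j = false := by
        rw [PySem.Dict.contains_eq_decide_mem_keys, hbkeys]
        exact decide_eq_false hmem
      rw [PySem.Dict.getD_of_not_contains bucket 0 hcon]
      rw [pointMul_of_not_mem (pvFilt l) j hmem]
  rcases hflcase : pvFilt l with _ | ⟨kv₀, rest⟩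
  · -- no positive nonzero multiplicity: both sides are empty
    rw [if_pos (by rw [hbitems, hflcase])]
    have hN : Nmul l = 0 := by
      rw [Nmul_filt, hflcase]
      rfl
    rw [hN, canonD_zero]
    rfl
  · rw [if_neg (by rw [hbitems, hflcase]; simp)]
    have hk0 : 0 ≤ kv₀.1 := by
      apply pvFilt_keys_nonneg l
      rw [hflcase]
      exact List.mem_map.mpr ⟨kv₀, List.mem_cons_self, rfl⟩
    have hmx : PySem.List.max? bucket.keys (fun x => x)
        = some ((rest.map Prod.fst).foldl max kv₀.1) := by
      rw [hbkeys, hflcase, List.map_cons]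
      exact PySem.List.max?_id_cons _ _
    simp only [hmx]
    set M := (rest.map Prod.fst).foldl max kv₀.1 with hMdef
    have hM0 : 0 ≤ M := le_trans hk0 (PySem.List.le_foldl_max (rest.map Prod.fst) kv₀.1).1
    have hrun : bucket.values.sum = Smul l 0 := by
      show (bucket.items.map Prod.snd).sum = _
      rw [hbitems]
      exact Smul_zero_filt l
    have hNM : (M + 1).toNat = Nmul l := by
      rw [Nmul_filt, hflcase]
      have hfold : (kv₀ :: rest).foldl (fun n kv => max n (kv.1 + 1).toNat) 0
          = ((kv₀ :: rest).map Prod.fst).foldl (fun n x => max n (x + 1).toNat) 0 := by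
        rw [List.foldl_map]
      rw [hfold, List.map_cons, List.foldl_cons]
      have hinit : max 0 (kv₀.1 + 1).toNat = (kv₀.1 + 1).toNat := by omega
      rw [hinit]
      have hall : ∀ x ∈ rest.map Prod.fst, 0 ≤ x := by
        intro x hx
        apply pvFilt_keys_nonneg l
        rw [hflcase, List.map_cons]
        exact List.mem_cons_of_mem _ hx
      rw [NKfold (rest.map Prod.fst) kv₀.1 hk0 hall]
    have hcast : M + 1 = (((M + 1).toNat : Nat) : Int) := by omega
    rw [hrun, hcast, B_loop bucket l hb ((M + 1).toNat), hNM]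

-- ===== VERDICT (by name: the statement is the Claim_ definition above) =====
theorem compute_restriction_SO3_spec : Claim_equal_compute_restriction_SO3 := by
  intro rep_dict _
  unfold Spec_compute_restriction_SO3
  exact ports_agree rep_dict
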